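-- pv_equiv track=rewrite | github.com/smoe/ClawBio | skills/wes-clinical-report-en/wes_clinical_report_en.py | extract_tables_and_text
-- ===== SOURCE A (Python) =====
-- def extract_tables_and_text(body):
--     """Split section body into alternating text and table blocks."""
--     parts = []
--     lines = body.split("\n")
--     buf = []
--     in_table = False
--     table_buf = []
--
--     for line in lines:
--         stripped = line.strip()
--         is_table_line = stripped.startswith("|") and "|" in stripped[1:]
--
--         if is_table_line:
--             if not in_table:
--                 if buf:
--                     parts.append(("text", "\n".join(buf)))
--                     buf = []
--                 in_table = True
--                 table_buf = []
--             table_buf.append(stripped)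
--         else:
--             if in_table:
--                 parts.append(("table", "\n".join(table_buf)))
--                 table_buf = []
--                 in_table = False
--             buf.append(line)
--
--     if in_table and table_buf:
--         parts.append(("table", "\n".join(table_buf)))
--     if buf:
--         joined = "\n".join(buf).strip()
--         if joined:
--             parts.append(("text", joined))
--
--     return parts
-- ===== SOURCE B (Python) =====
-- def _is_table_line(line):
--     s = line.strip()
--     return s.startswith("|") and "|" in s[1:]
--
--
-- def extract_tables_and_text(body):
--     """Split section body into alternating text and table blocks."""
--     parts = []
--     lines = body.split("\n")
--     while True:
--         i = next((k for k, l in enumerate(lines) if _is_table_line(l)), len(lines))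
--         if i == len(lines):
--             tail = "\n".join(lines).strip()
--             if tail:
--                 parts.append(("text", tail))
--             return parts
--         if i > 0:
--             parts.append(("text", "\n".join(lines[:i])))
--         k = next((m for m, l in enumerate(lines[i:]) if not _is_table_line(l)), len(lines) - i)
--         parts.append(("table", "\n".join(l.strip() for l in lines[i:i + k])))
--         lines = lines[i + k:]
-- ===== Notes on version B (the rewrite author's own statement) =====
-- stated objective: alternative
-- what changed: Replaces A's single-pass state machine (in_table flag with two mutable buffers flushed on transitions) by a repeated find-and-slice loop: search for the index of the next table line, emit the preceding text slice, search for the end of the table run, emit the stripped table slice, and continue on the remaining slice; the no-table base case flushes the stripped tail.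
import Mathlib
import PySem

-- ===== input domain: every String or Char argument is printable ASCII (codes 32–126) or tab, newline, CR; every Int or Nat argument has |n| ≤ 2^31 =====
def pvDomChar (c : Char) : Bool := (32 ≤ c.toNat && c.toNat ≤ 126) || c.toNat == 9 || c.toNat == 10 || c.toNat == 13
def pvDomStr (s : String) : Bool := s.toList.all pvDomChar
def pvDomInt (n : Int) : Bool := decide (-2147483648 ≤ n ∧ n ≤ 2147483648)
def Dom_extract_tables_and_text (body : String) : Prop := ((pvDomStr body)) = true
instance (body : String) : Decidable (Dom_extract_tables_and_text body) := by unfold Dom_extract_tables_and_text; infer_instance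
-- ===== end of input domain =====

-- B replaces A's per-line in_table/buf/table_buf state machine by repeated find-and-slice:
-- locate the start and end index of the next table run, emit the text slice before it and the
-- stripped table slice, and continue on the remainder (objective: alternative decomposition).

-- ===== PORT A =====
-- the for-loop of A, as structural recursion over the same state (parts, buf, in_table, table_buf),
-- followed by A's two trailing flushes
def extract_tables_and_text_loop (lines : List String)
    (parts : List (String × String)) (buf : List String)
    (in_table : Bool) (table_buf : List String) : List (String × String) :=
  match lines with
  | [] =>
    let parts := if in_table && !table_buf.isEmpty
      then parts ++ [("table", PySem.Str.join "\n" table_buf)] else parts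
    if !buf.isEmpty then
      let joined := PySem.Str.strip (PySem.Str.join "\n" buf)
      if joined ≠ "" then parts ++ [("text", joined)] else parts
    else parts
  | line :: rest =>
    let stripped := PySem.Str.strip line
    let is_table_line := PySem.Str.startswith stripped "|" &&
      PySem.Str.isIn "|" (PySem.Str.slice stripped (some 1) none)
    if is_table_line then
      if !in_table then
        let parts := if !buf.isEmpty then parts ++ [("text", PySem.Str.join "\n" buf)] else parts
        extract_tables_and_text_loop rest parts [] true ([] ++ [stripped])
      else
        extract_tables_and_text_loop rest parts buf in_table (table_buf ++ [stripped])
    else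
      if in_table then
        extract_tables_and_text_loop rest (parts ++ [("table", PySem.Str.join "\n" table_buf)])
          (buf ++ [line]) false []
      else
        extract_tables_and_text_loop rest parts (buf ++ [line]) in_table table_buf

def extract_tables_and_text (body : String) : List (String × String) :=
  extract_tables_and_text_loop ((PySem.Str.split? body "\n").getD []) [] [] false []

-- ===== PORT B =====
-- _is_table_line of Source B
def isTableLine (line : String) : Bool :=
  let stripped := PySem.Str.strip line
  PySem.Str.startswith stripped "|" &&
    PySem.Str.isIn "|" (PySem.Str.slice stripped (some 1) none)

-- Source B's while-loop: i = index of the first table line (len(lines) if none, ported as List.findIdx,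
-- which returns the length when no element matches — exactly Python's sentinel); on the sentinel,
-- flush the stripped tail; otherwise emit the text slice lines[:i], find k = length of the table
-- run starting at i, emit the stripped table slice lines[i:i+k], and loop on lines[i+k:]
def bLoop (parts : List (String × String)) (lines : List String) : List (String × String) :=
  if hi : lines.findIdx isTableLine = lines.length then
    let tail := PySem.Str.strip (PySem.Str.join "\n" lines)
    if tail = "" then parts else parts ++ [("text", tail)]
  else
    let i := lines.findIdx isTableLine
    let parts' := if 0 < i then parts ++ [("text", PySem.Str.join "\n" (lines.take i))] else parts
    let k := (lines.drop i).findIdx (fun l => !isTableLine l)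
    bLoop (parts' ++ [("table", PySem.Str.join "\n" (((lines.drop i).take k).map PySem.Str.strip))])
      (lines.drop (i + k))
termination_by lines.length
decreasing_by
  have hle := List.findIdx_le_length (p := isTableLine) (xs := lines)
  have hlt : lines.findIdx isTableLine < lines.length := lt_of_le_of_ne hle hi
  have hdrop : lines.drop (lines.findIdx isTableLine)
      = lines[lines.findIdx isTableLine] :: lines.drop (lines.findIdx isTableLine + 1) :=
    List.drop_eq_getElem_cons hlt
  have hp : isTableLine (lines[lines.findIdx isTableLine]) = true :=
    List.findIdx_getElem (w := hlt)
  have hk : 1 ≤ (lines.drop (lines.findIdx isTableLine)).findIdx (fun l => !isTableLine l) := by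
    rw [hdrop, List.findIdx_cons, hp]; simp
  simp only [List.length_drop]
  omega

def extract_tables_and_text_alt (body : String) : List (String × String) :=
  bLoop [] ((PySem.Str.split? body "\n").getD [])

-- ===== PRECONDITION & SPEC =====
def Spec_extract_tables_and_text (body : String) (out : List (String × String)) : Prop := out = extract_tables_and_text_alt body
instance (body : String) (out : List (String × String)) : Decidable (Spec_extract_tables_and_text body out) := by unfold Spec_extract_tables_and_text; infer_instance

-- ===== CLAIM (what is proved, stated in full; the proofs are below) =====
def Claim_equal_extract_tables_and_text : Prop := ∀ (body : String), Dom_extract_tables_and_text body → Spec_extract_tables_and_text body (extract_tables_and_text body)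

-- ===== LEMMAS AND PROOFS =====

-- proof-level continuation semantics of A's loop: text mode carrying buf / table mode carrying table_buf
mutual
def textCont (buf : List String) (lines : List String) : List (String × String) :=
  match lines with
  | [] =>
    let j := PySem.Str.strip (PySem.Str.join "\n" buf)
    if j = "" then [] else [("text", j)]
  | l :: ls =>
    if isTableLine l then
      (if buf.isEmpty then [] else [("text", PySem.Str.join "\n" buf)]) ++
        tableCont [PySem.Str.strip l] ls
    else textCont (buf ++ [l]) ls
termination_by lines.length

def tableCont (tbuf : List String) (lines : List String) : List (String × String) :=
  match lines with
  | [] => [("table", PySem.Str.join "\n" tbuf)]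
  | l :: ls =>
    if isTableLine l then tableCont (tbuf ++ [PySem.Str.strip l]) ls
    else ("table", PySem.Str.join "\n" tbuf) :: textCont [l] ls
termination_by lines.length
end

-- A's loop computes the continuation semantics
theorem loopA_eq (lines : List String) :
    (∀ parts buf, extract_tables_and_text_loop lines parts buf false [] = parts ++ textCont buf lines) ∧
    (∀ parts tbuf, tbuf ≠ [] → extract_tables_and_text_loop lines parts [] true tbuf = parts ++ tableCont tbuf lines) := by
  induction lines with
  | nil =>
    constructor
    · intro parts buf
      simp only [extract_tables_and_text_loop, textCont]
      cases buf with
      | nil =>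
        have he : PySem.Str.strip (PySem.Str.join "\n" ([] : List String)) = "" := by decide
        simp [he]
      | cons b bs =>
        by_cases h : PySem.Str.strip (PySem.Str.join "\n" (b :: bs)) = "" <;> simp [h]
    · intro parts tbuf htb
      simp only [extract_tables_and_text_loop, tableCont]
      cases tbuf with
      | nil => exact absurd rfl htb
      | cons t ts => simp
  | cons line rest ih =>
    obtain ⟨ihT, ihB⟩ := ih
    constructor
    · intro parts buf
      simp only [extract_tables_and_text_loop, textCont, isTableLine]
      by_cases h : (PySem.Str.startswith (PySem.Str.strip line) "|" &&
          PySem.Str.isIn "|" (PySem.Str.slice (PySem.Str.strip line) (some 1) none)) = true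
      · simp only [h, Bool.not_false, if_pos]
        rw [ihB _ _ (by simp)]
        cases buf with
        | nil => simp
        | cons b bs => simp [List.append_assoc]
      · simp only [h, Bool.false_eq_true, if_neg, not_false_eq_true]
        rw [ihT]
    · intro parts tbuf htb
      simp only [extract_tables_and_text_loop, tableCont, isTableLine]
      by_cases h : (PySem.Str.startswith (PySem.Str.strip line) "|" &&
          PySem.Str.isIn "|" (PySem.Str.slice (PySem.Str.strip line) (some 1) none)) = true
      · simp only [h, if_pos, Bool.not_true, Bool.false_eq_true, if_neg not_false]
        rw [ihB _ _ (by simp)]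
      · simp only [h, Bool.false_eq_true, if_false, if_true]
        rw [ihT]
        cases tbuf with
        | nil => exact absurd rfl htb
        | cons t ts => simp [List.append_assoc]

theorem textCont_run (run : List String) (h : ∀ l ∈ run, isTableLine l = false) :
    ∀ buf rest, textCont buf (run ++ rest) = textCont (buf ++ run) rest := by
  induction run with
  | nil => intro buf rest; simp
  | cons l ls ih =>
    intro buf rest
    rw [List.cons_append, textCont, if_neg (by simp [h l (by simp)])]
    rw [ih (fun x hx => h x (by simp [hx])) (buf ++ [l]) rest]
    simp

theorem tableCont_run (run : List String) (h : ∀ l ∈ run, isTableLine l = true) :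
    ∀ tbuf rest, tableCont tbuf (run ++ rest) = tableCont (tbuf ++ run.map PySem.Str.strip) rest := by
  induction run with
  | nil => intro tbuf rest; simp
  | cons l ls ih =>
    intro tbuf rest
    rw [List.cons_append, tableCont, if_pos (h l (by simp))]
    rw [ih (fun x hx => h x (by simp [hx])) (tbuf ++ [PySem.Str.strip l]) rest]
    simp

theorem textCont_nil_nil : textCont [] [] = [] := by
  rw [textCont]
  simp only [if_pos (show PySem.Str.strip (PySem.Str.join "\n" []) = "" by decide)]

-- take/drop at findIdx are takeWhile/dropWhile of the negated predicate
theorem findIdx_take_drop (q : String → Bool) (l : List String) :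
    l.take (l.findIdx q) = l.takeWhile (fun x => !q x) ∧
    l.drop (l.findIdx q) = l.dropWhile (fun x => !q x) := by
  induction l with
  | nil => simp
  | cons a t ih =>
    cases hq : q a with
    | false =>
      simp only [List.findIdx_cons, hq, cond_false, List.take_succ_cons, List.drop_succ_cons,
        List.takeWhile_cons, List.dropWhile_cons, Bool.not_false, if_pos]
      exact ⟨by rw [ih.1], by rw [ih.2]⟩
    | true =>
      simp [List.findIdx_cons, hq]

-- B's loop computes the continuation semantics
theorem bLoop_eq_aux (N : Nat) : ∀ lines : List String, lines.length ≤ N →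
    ∀ parts, bLoop parts lines = parts ++ textCont [] lines := by
  induction N with
  | zero =>
    intro lines h parts
    have h0 : lines = [] := List.eq_nil_of_length_eq_zero (Nat.le_zero.mp h)
    subst h0
    have hc : List.findIdx isTableLine ([] : List String) = ([] : List String).length := rfl
    rw [bLoop, dif_pos hc, textCont_nil_nil]
    simp [show PySem.Str.strip (PySem.Str.join "\n" ([] : List String)) = "" from by decide]
  | succ N ihN =>
    intro lines hlen parts
    by_cases hi : lines.findIdx isTableLine = lines.length
    · -- no table line: all lines non-table
      rw [bLoop, dif_pos hi]
      have hall : ∀ x ∈ lines, isTableLine x = false := by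
        have htw : lines.takeWhile (fun x => !isTableLine x) = lines := by
          have := (findIdx_take_drop isTableLine lines).1
          rw [hi, List.take_length] at this
          exact this.symm
        intro x hx
        have hx' : x ∈ lines.takeWhile (fun x => !isTableLine x) := by rw [htw]; exact hx
        have := List.mem_takeWhile_imp hx'
        simpa using this
      have hrun : textCont [] lines = textCont lines [] := by
        have := textCont_run lines hall [] []
        simpa using this
      rw [hrun, textCont]
      by_cases hj : PySem.Str.strip (PySem.Str.join "\n" lines) = "" <;> simp [hj]
    · -- a table run exists
      rw [bLoop, dif_neg hi]
      simp only
      set i := lines.findIdx isTableLine with hi_def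
      have hle := List.findIdx_le_length (p := isTableLine) (xs := lines)
      have hlt : i < lines.length := lt_of_le_of_ne hle hi
      have hpre : ∀ x ∈ lines.take i, isTableLine x = false := by
        intro x hx
        rw [(findIdx_take_drop isTableLine lines).1] at hx
        have := List.mem_takeWhile_imp hx
        simpa using this
      set tl := lines[i] with htl_def
      have hdropC : lines.drop i = tl :: lines.drop (i + 1) := List.drop_eq_getElem_cons hlt
      have hptl : isTableLine tl = true := List.findIdx_getElem (w := hlt)
      set rest := lines.drop (i + 1) with hrest_def
      set k' := rest.findIdx (fun l => !isTableLine l) with hk'_def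
      have hk : (lines.drop i).findIdx (fun l => !isTableLine l) = k' + 1 := by
        rw [hdropC, List.findIdx_cons, hptl]; rfl
      have hrun_tbl : ∀ x ∈ rest.take k', isTableLine x = true := by
        intro x hx
        rw [(findIdx_take_drop (fun l => !isTableLine l) rest).1] at hx
        have := List.mem_takeWhile_imp hx
        simpa using this
      have hrest2 : lines.drop (i + (k' + 1)) = rest.drop k' := by
        rw [show i + (k' + 1) = (i + 1) + k' from by omega, hrest_def, List.drop_drop]
      have hslice : (lines.drop i).take (k' + 1) = tl :: rest.take k' := by
        rw [hdropC]; rfl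
      -- expand textCont [] lines
      have hsplit : textCont [] lines
          = (if 0 < i then [("text", PySem.Str.join "\n" (lines.take i))] else [])
            ++ tableCont ((tl :: rest.take k').map PySem.Str.strip) (rest.drop k') := by
        conv_lhs => rw [← List.take_append_drop i lines]
        rw [textCont_run (lines.take i) hpre [] (lines.drop i), List.nil_append, hdropC]
        conv_lhs => rw [← List.take_append_drop k' rest]
        rw [textCont, if_pos hptl]
        rw [tableCont_run (rest.take k') hrun_tbl [PySem.Str.strip tl] (rest.drop k')]
        congr 1
        · by_cases h0 : 0 < i
          · have hne : ¬ (lines.take i).isEmpty = true := by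
              intro hemp
              rw [List.isEmpty_iff] at hemp
              have hlen' := congrArg List.length hemp
              rw [List.length_take] at hlen'
              simp only [List.length_nil] at hlen'
              omega
            rw [if_neg hne, if_pos h0]
          · have h0' : i = 0 := by omega
            rw [if_pos (by rw [h0']; simp), if_neg h0]
      rw [hk, hrest2, hslice]
      cases hr2 : rest.drop k' with
      | nil =>
        rw [ihN _ (by simp) _]
        rw [textCont_nil_nil, hsplit, hr2, tableCont]
        by_cases h0 : 0 < i <;> simp [h0]
      | cons r rs =>
        have hrlen : (r :: rs).length ≤ N := by
          have hlen2 : (rest.drop k').length ≤ lines.length - 1 := by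
            simp only [List.length_drop, hrest_def]
            omega
          rw [hr2] at hlen2
          omega
        rw [ihN _ hrlen _]
        have hdw : rest.drop k' = rest.dropWhile isTableLine := by
          have h2 := (findIdx_take_drop (fun l => !isTableLine l) rest).2
          simp only [Bool.not_not] at h2
          exact h2
        have hrlow : isTableLine r = false := by
          have hw : rest.dropWhile isTableLine ≠ [] := by rw [← hdw, hr2]; simp
          have hh := List.head_dropWhile_not isTableLine (l := rest) hw
          have hhd : (rest.dropWhile isTableLine).head hw = r := by
            have hcons : rest.dropWhile isTableLine = r :: rs := by rw [← hdw, hr2]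
            simp [hcons]
          rw [hhd] at hh
          exact hh
        have htx : textCont [] (r :: rs) = textCont [r] rs := by
          rw [textCont, if_neg (show ¬ isTableLine r = true by simp [hrlow])]
          simp
        rw [htx, hsplit, hr2, tableCont,
          if_neg (show ¬ isTableLine r = true by simp [hrlow])]
        by_cases h0 : 0 < i <;> simp [h0]

-- ===== VERDICT (by name: the statement is the Claim_ definition above) =====
theorem extract_tables_and_text_spec : Claim_equal_extract_tables_and_text := by
  intro body _
  show extract_tables_and_text body = extract_tables_and_text_alt body
  unfold extract_tables_and_text extract_tables_and_text_alt
  rw [(loopA_eq _).1, bLoop_eq_aux ((PySem.Str.split? body "\n").getD []).length _ le_rfl]
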